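-- pv_equiv track=rewrite | github.com/pipixia-labs/openppx | openppx/channels/feishu.py | _split_elements_by_table_limit
-- ===== SOURCE A (Python) =====
-- from typing import Any
--
-- def _split_elements_by_table_limit(elements: list[dict[str, Any]], max_tables: int = 1) -> list[list[dict[str, Any]]]:
--     """Split card elements into groups with at most ``max_tables`` tables."""
--
--     if not elements:
--         return [[]]
--     groups: list[list[dict[str, Any]]] = []
--     current: list[dict[str, Any]] = []
--     table_count = 0
--     for element in elements:
--         if element.get("tag") == "table":
--             if table_count >= max_tables:
--                 if current:
--                     groups.append(current)
--                 current = []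
--                 table_count = 0
--             current.append(element)
--             table_count += 1
--         else:
--             current.append(element)
--     if current:
--         groups.append(current)
--     return groups or [[]]
-- ===== SOURCE B (Python) =====
-- def _split_elements_by_table_limit(elements, max_tables=1):
--     """Split card elements into groups with at most ``max_tables`` tables."""
--     if not elements:
--         return [[]]
--     table_idx = [i for i, e in enumerate(elements) if e.get("tag") == "table"]
--     if max_tables >= 1:
--         cuts = [t for r, t in enumerate(table_idx) if r > 0 and r % max_tables == 0]
--     else:
--         cuts = table_idx
--     result = []
--     prev = 0
--     for c in cuts:
--         if prev < c:
--             result.append(elements[prev:c])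
--         prev = c
--     result.append(elements[prev:])
--     return result
-- ===== Notes on version B (the rewrite author's own statement) =====
-- stated objective: alternative
-- what changed: B replaces A's single pass with a resetting table counter by a two-phase plan: collect the table indices, derive cut positions from table ranks (every max_tables-th table, or every table when max_tables <= 0), then slice the element list at those cuts.
import Mathlib
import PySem

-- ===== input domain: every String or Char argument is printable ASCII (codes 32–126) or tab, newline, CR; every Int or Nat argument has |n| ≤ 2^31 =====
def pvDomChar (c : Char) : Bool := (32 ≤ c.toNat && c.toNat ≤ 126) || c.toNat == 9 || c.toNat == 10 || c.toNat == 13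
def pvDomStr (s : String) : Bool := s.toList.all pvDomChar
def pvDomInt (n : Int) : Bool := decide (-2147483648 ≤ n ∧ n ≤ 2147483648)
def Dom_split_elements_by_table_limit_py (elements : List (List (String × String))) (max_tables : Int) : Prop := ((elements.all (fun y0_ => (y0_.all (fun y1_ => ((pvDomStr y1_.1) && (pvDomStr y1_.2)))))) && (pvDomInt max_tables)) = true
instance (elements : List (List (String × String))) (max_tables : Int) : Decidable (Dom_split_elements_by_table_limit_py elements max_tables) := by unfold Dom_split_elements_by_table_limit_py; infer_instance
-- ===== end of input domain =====

-- B replaces A's resetting table counter with a two-phase plan: it collects the table indices,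
-- derives the cut positions from the table RANKS (every max_tables-th table, or every table when
-- max_tables <= 0), and slices the element list at those cuts; objective: alternative decomposition.

-- ===== PORT A =====
-- A-side helper: the body of A's for-loop; state = (groups, current, table_count)
def pvStepA (max_tables : Int)
    (st : List (List (List (String × String))) × List (List (String × String)) × Int)
    (element : List (String × String)) :
    List (List (List (String × String))) × List (List (String × String)) × Int :=
  if (PySem.Dict.mk element).get? "tag" = some "table" then
    if st.2.2 ≥ max_tables then
      ((if st.2.1 ≠ [] then st.1 ++ [st.2.1] else st.1), [element], 1)
    else (st.1, st.2.1 ++ [element], st.2.2 + 1)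
  else (st.1, st.2.1 ++ [element], st.2.2)

def split_elements_by_table_limit_py (elements : List (List (String × String))) (max_tables : Int) : List (List (List (String × String))) :=
  if elements = [] then [[]] else
  let s := elements.foldl (pvStepA max_tables) ([], [], 0)
  let groups := if s.2.1 ≠ [] then s.1 ++ [s.2.1] else s.1
  if groups = [] then [[]] else groups

-- ===== PORT B =====
-- B-side helpers: the two comprehensions and the body of the slicing loop of Source B
def pvTableIdx (elements : List (List (String × String))) : List Int :=
  (PySem.List.enumerate elements).filterMap
    (fun p => if (PySem.Dict.mk p.2).get? "tag" = some "table" then some p.1 else none)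

def pvCuts (table_idx : List Int) (max_tables : Int) : List Int :=
  if max_tables ≥ 1 then
    (PySem.List.enumerate table_idx).filterMap
      (fun p => if 0 < p.1 ∧ PySem.Int.mod p.1 max_tables = 0 then some p.2 else none)
  else table_idx

def pvStepB (elements : List (List (String × String)))
    (st : List (List (List (String × String))) × Int) (c : Int) :
    List (List (List (String × String))) × Int :=
  ((if st.2 < c then st.1 ++ [PySem.List.slice elements (some st.2) (some c)] else st.1), c)

def split_elements_by_table_limit_py_alt (elements : List (List (String × String))) (max_tables : Int) : List (List (List (String × String))) :=
  if elements = [] then [[]] else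
  let cuts := pvCuts (pvTableIdx elements) max_tables
  let s := cuts.foldl (pvStepB elements) ([], 0)
  s.1 ++ [PySem.List.slice elements (some s.2) none]

-- ===== PRECONDITION & SPEC =====
def Spec_split_elements_by_table_limit_py (elements : List (List (String × String))) (max_tables : Int) (out : List (List (List (String × String)))) : Prop := out = split_elements_by_table_limit_py_alt elements max_tables
instance (elements : List (List (String × String))) (max_tables : Int) (out : List (List (List (String × String)))) : Decidable (Spec_split_elements_by_table_limit_py elements max_tables out) := by unfold Spec_split_elements_by_table_limit_py; infer_instance

-- ===== CLAIM (what is proved, stated in full; the proofs are below) =====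
def Claim_equal_split_elements_by_table_limit_py : Prop := ∀ (elements : List (List (String × String))) (max_tables : Int), Dom_split_elements_by_table_limit_py elements max_tables → Spec_split_elements_by_table_limit_py elements max_tables (split_elements_by_table_limit_py elements max_tables)

-- ===== LEMMAS AND PROOFS =====

-- table_idx of a list with one element appended
theorem pvTableIdx_append (es : List (List (String × String))) (e : List (String × String)) :
    pvTableIdx (es ++ [e]) =
      pvTableIdx es ++
        (if (PySem.Dict.mk e).get? "tag" = some "table" then [((es.length : Int))] else []) := by
  simp [pvTableIdx, PySem.List.enumerate_append, PySem.List.enumerate_cons,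
    PySem.List.enumerate_nil, List.filterMap_append]
  split <;> simp_all

-- every table index is in [0, length)
theorem pv_mem_tableIdx {es : List (List (String × String))} {c : Int}
    (h : c ∈ pvTableIdx es) : 0 ≤ c ∧ c < (es.length : Int) := by
  simp only [pvTableIdx, List.mem_filterMap] at h
  obtain ⟨p, hp, hc⟩ := h
  rw [PySem.List.mem_enumerate_iff] at hp
  obtain ⟨k, hk, rfl⟩ := hp
  split at hc
  · cases hc; constructor <;> [positivity; exact_mod_cast by omega]
  · cases hc

theorem pv_mem_cuts {t : List Int} {mt c : Int} (h : c ∈ pvCuts t mt) : c ∈ t := by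
  unfold pvCuts at h
  split at h
  · simp only [List.mem_filterMap] at h
    obtain ⟨p, hp, hc⟩ := h
    rw [PySem.List.mem_enumerate_iff] at hp
    obtain ⟨k, hk, rfl⟩ := hp
    split at hc
    · cases hc; exact List.getElem_mem hk
    · cases hc
  · exact h

-- cuts of table_idx with one index appended (max_tables ≥ 1)
theorem pvCuts_append_pos (t : List Int) (n mt : Int) (hmt : 1 ≤ mt) :
    pvCuts (t ++ [n]) mt =
      pvCuts t mt ++
        (if 0 < (t.length : Int) ∧ PySem.Int.mod (t.length : Int) mt = 0 then [n] else []) := by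
  simp [pvCuts, hmt, PySem.List.enumerate_append, PySem.List.enumerate_cons,
    PySem.List.enumerate_nil, List.filterMap_append]
  split <;> simp_all

theorem pvCuts_append_nonpos (t : List Int) (n mt : Int) (hmt : ¬ 1 ≤ mt) :
    pvCuts (t ++ [n]) mt = pvCuts t mt ++ [n] := by
  simp [pvCuts, hmt]

-- a slice with both bounds within es is unchanged by appending e
theorem pv_slice_stable (es : List (List (String × String))) (e : List (String × String))
    {a b : Int} (ha : 0 ≤ a) (hb0 : 0 ≤ b) (hb : b ≤ (es.length : Int)) :
    PySem.List.slice (es ++ [e]) (some a) (some b) = PySem.List.slice es (some a) (some b) := by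
  rw [PySem.List.slice_toNat _ ha hb0, PySem.List.slice_toNat _ ha hb0]
  have hbn : b.toNat ≤ es.length := by omega
  rcases le_or_gt a.toNat es.length with hle | hgt
  · rw [List.drop_append_of_le_length hle, List.take_append_of_le_length (by simp; omega)]
  · have : b.toNat - a.toNat = 0 := by omega
    simp [this]

-- folding the slicing loop over in-range cuts is unchanged by appending e
theorem pvFoldB_stable (es : List (List (String × String))) (e : List (String × String))
    (cs : List Int) (init : List (List (List (String × String))) × Int)
    (h0 : 0 ≤ init.2) (hcs : ∀ c ∈ cs, 0 ≤ c ∧ c ≤ (es.length : Int)) :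
    cs.foldl (pvStepB (es ++ [e])) init = cs.foldl (pvStepB es) init := by
  induction cs generalizing init with
  | nil => rfl
  | cons c cs ih =>
    obtain ⟨hc0, hclen⟩ := hcs c (by simp)
    have hstep : pvStepB (es ++ [e]) init c = pvStepB es init c := by
      unfold pvStepB
      split
      · rw [pv_slice_stable es e h0 hc0 hclen]
      · rfl
    simp only [List.foldl_cons, hstep]
    exact ih _ hc0 (fun x hx => hcs x (by simp [hx]))

-- (a+1) % mt steps cyclically
theorem pv_emod_succ (a mt : Int) (hmt : 1 ≤ mt) :
    (a + 1) % mt = if a % mt = mt - 1 then 0 else a % mt + 1 := by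
  have h : a % mt + mt * (a / mt) = a := Int.emod_add_mul_ediv a mt
  have h0 : 0 ≤ a % mt := Int.emod_nonneg a (by omega)
  have h1 : a % mt < mt := Int.emod_lt_of_pos a (by omega)
  have key : (a + 1) % mt = (a % mt + 1) % mt := by
    conv_lhs => rw [show a + 1 = (a % mt + 1) + mt * (a / mt) by omega]
    rw [Int.add_mul_emod_self_left]
  by_cases hcase : a % mt = mt - 1
  · rw [if_pos hcase, key, hcase, show mt - 1 + 1 = mt by ring, Int.emod_self]
  · rw [if_neg hcase, key, Int.emod_eq_of_lt (by omega) (by omega)]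

-- the main loop invariant, by induction from the right
theorem pvInv (mt : Int) (es : List (List (String × String))) :
    (es.foldl (pvStepA mt) ([], [], 0)).1 = ((pvCuts (pvTableIdx es) mt).foldl (pvStepB es) ([], 0)).1 ∧
    (es.foldl (pvStepA mt) ([], [], 0)).2.1 = es.drop ((pvCuts (pvTableIdx es) mt).foldl (pvStepB es) ([], 0)).2.toNat ∧
    0 ≤ ((pvCuts (pvTableIdx es) mt).foldl (pvStepB es) ([], 0)).2 ∧
    ((pvCuts (pvTableIdx es) mt).foldl (pvStepB es) ([], 0)).2.toNat ≤ es.length ∧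
    (es ≠ [] → (es.foldl (pvStepA mt) ([], [], 0)).2.1 ≠ []) ∧
    0 ≤ (es.foldl (pvStepA mt) ([], [], 0)).2.2 ∧
    (1 ≤ mt → (es.foldl (pvStepA mt) ([], [], 0)).2.2 =
      (if (pvTableIdx es).length = 0 then 0 else ((pvTableIdx es).length : Int) - 1) % mt +
        (if (pvTableIdx es).length = 0 then 0 else 1)) := by
  induction es using List.reverseRecOn with
  | nil =>
    simp [pvTableIdx, pvCuts, PySem.List.enumerate_nil]
  | append_singleton es e ih =>
    obtain ⟨ih1, ih2, ih3, ih4, ih5, ih6, ih7⟩ := ih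
    set A := es.foldl (pvStepA mt) ([], [], 0) with hA
    set B := (pvCuts (pvTableIdx es) mt).foldl (pvStepB es) ([], 0) with hB
    have hfoldA : (es ++ [e]).foldl (pvStepA mt) ([], [], 0) = pvStepA mt A e := by
      rw [List.foldl_append]; rfl
    have hcutsmem : ∀ c ∈ pvCuts (pvTableIdx es) mt, 0 ≤ c ∧ c ≤ (es.length : Int) := fun c hc =>
      ⟨(pv_mem_tableIdx (pv_mem_cuts hc)).1, le_of_lt (pv_mem_tableIdx (pv_mem_cuts hc)).2⟩
    have hstable : (pvCuts (pvTableIdx es) mt).foldl (pvStepB (es ++ [e])) ([], 0) = B :=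
      pvFoldB_stable es e _ _ (by norm_num) hcutsmem
    by_cases htab : (PySem.Dict.mk e).get? "tag" = some "table"
    case neg =>
      have htidx : pvTableIdx (es ++ [e]) = pvTableIdx es := by
        rw [pvTableIdx_append]; simp [htab]
      have hfoldB : (pvCuts (pvTableIdx (es ++ [e])) mt).foldl (pvStepB (es ++ [e])) ([], 0) = B := by
        rw [htidx, hstable]
      rw [hfoldA, hfoldB, htidx]
      unfold pvStepA
      rw [if_neg htab]
      refine ⟨ih1, ?_, ih3, by simp; omega, by simp, ih6, ih7⟩
      rw [List.drop_append_of_le_length ih4, ih2]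
    case pos =>
      have htidx : pvTableIdx (es ++ [e]) = pvTableIdx es ++ [((es.length : Int))] := by
        rw [pvTableIdx_append]; simp [htab]
      rw [hfoldA, htidx]
      unfold pvStepA
      rw [if_pos htab]
      by_cases hfl : A.2.2 ≥ mt
      case pos =>
        rw [if_pos hfl]
        -- the cut fires in B too
        have hcut : pvCuts (pvTableIdx es ++ [((es.length : Int))]) mt
            = pvCuts (pvTableIdx es) mt ++ [((es.length : Int))] := by
          by_cases hmt : 1 ≤ mt
          · rw [pvCuts_append_pos _ _ _ hmt]
            have ht := ih7 hmt
            have hR : (pvTableIdx es).length ≠ 0 := by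
              intro h0
              rw [ht, h0] at hfl; simp at hfl; omega
            rw [if_pos]
            refine ⟨by positivity, ?_⟩
            rw [PySem.Int.mod_eq_emod_of_pos (by omega)]
            rw [ht, if_neg hR, if_neg hR] at hfl
            set a : Int := ((pvTableIdx es).length : Int) - 1 with ha
            have h1 : a % mt < mt := Int.emod_lt_of_pos a (by omega)
            have hsucc := pv_emod_succ a mt hmt
            have : a % mt = mt - 1 := by omega
            rw [show ((pvTableIdx es).length : Int) = a + 1 by omega, hsucc, if_pos this]
          · exact pvCuts_append_nonpos _ _ _ hmt
        rw [hcut, List.foldl_append, hstable]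
        have hn0 : (0:Int) ≤ (es.length : Int) := by positivity
        have hslice : PySem.List.slice (es ++ [e]) (some B.2) (some ((es.length : Int)))
            = es.drop B.2.toNat := by
          rw [pv_slice_stable es e ih3 hn0 (le_refl _),
            PySem.List.slice_toNat _ ih3 hn0]
          exact List.take_of_length_le (by simp)
        have hiff : B.2 < ((es.length : Int)) ↔ A.2.1 ≠ [] := by
          rw [ih2]
          simp [List.drop_eq_nil_iff]
          omega
        constructor
        · -- groups
          show (if A.2.1 ≠ [] then A.1 ++ [A.2.1] else A.1)
              = (pvStepB (es ++ [e]) B ((es.length : Int))).1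
          unfold pvStepB
          by_cases hcne : A.2.1 = []
          · rw [if_neg (by simp [hcne]), if_neg (by rw [hiff]; simp [hcne]), ih1]
          · rw [if_pos hcne, if_pos (hiff.mpr hcne), ih1, ih2, hslice]
        refine ⟨?_, by positivity, ?_, by simp, by norm_num, ?_⟩
        · show [e] = (es ++ [e]).drop (pvStepB (es ++ [e]) B ((es.length : Int))).2.toNat
          show [e] = (es ++ [e]).drop ((es.length : Int)).toNat
          simp
        · show ((es.length : Int)).toNat ≤ (es ++ [e]).length
          simp
        · -- counter after a flush
          intro hmt
          have ht := ih7 hmt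
          show (1 : Int) = _
          have hL : (pvTableIdx es ++ [((es.length : Int))]).length = (pvTableIdx es).length + 1 := by simp
          rw [hL]
          rw [if_neg (by omega), if_neg (by omega)]
          -- need ((R+1) - 1) % mt = 0, i.e. R % mt = 0
          have hR0 : ((pvTableIdx es).length : Int) % mt = 0 := by
            by_cases hR : (pvTableIdx es).length = 0
            · rw [hR]; simp
            · rw [ht, if_neg hR, if_neg hR] at hfl
              set a : Int := ((pvTableIdx es).length : Int) - 1 with ha
              have h1 : a % mt < mt := Int.emod_lt_of_pos a (by omega)
              have hsucc := pv_emod_succ a mt hmt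
              have : a % mt = mt - 1 := by omega
              rw [show ((pvTableIdx es).length : Int) = a + 1 by omega, hsucc, if_pos this]
          push_cast
          rw [show ((pvTableIdx es).length : Int) + 1 - 1 = ((pvTableIdx es).length : Int) by ring, hR0]
          norm_num
      case neg =>
        rw [if_neg hfl]
        -- no cut in B: mt ≥ 1 (else flush would fire) and the rank condition fails
        have hmt : 1 ≤ mt := by
          by_contra hmt
          exact hfl (le_trans (by omega : mt ≤ (0 : Int)) ih6)
        have hq : ¬ (0 < ((pvTableIdx es).length : Int) ∧ ((pvTableIdx es).length : Int) % mt = 0) := by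
          rintro ⟨hpos, hmod⟩
          have hR : (pvTableIdx es).length ≠ 0 := by omega
          have ht := ih7 hmt
          rw [ht, if_neg hR, if_neg hR] at hfl
          set a : Int := ((pvTableIdx es).length : Int) - 1 with ha
          have h0 : 0 ≤ a % mt := Int.emod_nonneg a (by omega)
          have h1 : a % mt < mt := Int.emod_lt_of_pos a (by omega)
          have hsucc := pv_emod_succ a mt hmt
          rw [show ((pvTableIdx es).length : Int) = a + 1 by omega, hsucc] at hmod
          by_cases hcase : a % mt = mt - 1
          · exact hfl (by omega)
          · rw [if_neg hcase] at hmod; omega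
        have hcut : pvCuts (pvTableIdx es ++ [((es.length : Int))]) mt
            = pvCuts (pvTableIdx es) mt := by
          rw [pvCuts_append_pos _ _ _ hmt, if_neg (by
            rw [PySem.Int.mod_eq_emod_of_pos (by omega)]; exact hq)]
          simp
        rw [hcut, hstable]
        refine ⟨ih1, ?_, ih3, by simp; omega, by simp, by have := ih6; simp; omega, ?_⟩
        · show A.2.1 ++ [e] = (es ++ [e]).drop B.2.toNat
          rw [List.drop_append_of_le_length ih4, ih2]
        · -- counter: t + 1 matches rank R + 1
          intro _
          have ht := ih7 hmt
          have hL : (pvTableIdx es ++ [((es.length : Int))]).length = (pvTableIdx es).length + 1 := by simp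
          rw [hL, if_neg (by omega), if_neg (by omega)]
          by_cases hR : (pvTableIdx es).length = 0
          · rw [ht, if_pos hR, if_pos hR, hR]
            simp
          · rw [ht, if_neg hR, if_neg hR]
            set a : Int := ((pvTableIdx es).length : Int) - 1 with ha
            have h0 : 0 ≤ a % mt := Int.emod_nonneg a (by omega)
            have h1 : a % mt < mt := Int.emod_lt_of_pos a (by omega)
            have hsucc := pv_emod_succ a mt hmt
            have hRpos : 0 < ((pvTableIdx es).length : Int) := by positivity
            have hne : ¬ (a % mt = mt - 1) := by
              intro hcase
              exact hq ⟨hRpos, by rw [show ((pvTableIdx es).length : Int) = a + 1 by omega, hsucc, if_pos hcase]⟩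
            rw [if_neg hne] at hsucc
            push_cast
            rw [show ((pvTableIdx es).length : Int) + 1 - 1 = a + 1 by omega, hsucc]

-- the two ports agree
theorem pvMain (elements : List (List (String × String))) (max_tables : Int) :
    split_elements_by_table_limit_py elements max_tables =
      split_elements_by_table_limit_py_alt elements max_tables := by
  unfold split_elements_by_table_limit_py split_elements_by_table_limit_py_alt
  by_cases hnil : elements = []
  · simp [hnil]
  · rw [if_neg hnil, if_neg hnil]
    obtain ⟨ih1, ih2, ih3, ih4, ih5, ih6, ih7⟩ := pvInv max_tables elements
    have hc := ih5 hnil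
    simp only []
    rw [if_pos hc, if_neg (by simp), ih1, ih2, PySem.List.slice_from _ ih3]

-- ===== VERDICT (by name: the statement is the Claim_ definition above) =====
theorem split_elements_by_table_limit_py_spec : Claim_equal_split_elements_by_table_limit_py := by
  intro elements max_tables _
  unfold Spec_split_elements_by_table_limit_py
  exact pvMain elements max_tables
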